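-- pv_equiv track=rewrite | github.com/jeekim2/algostudy_ind | Problems/11660/ans_11660_JHK.py | get_area_sum
-- ===== SOURCE A (Python) =====
-- def get_area_sum(N, x1, y1, x2, y2, PSumTable):
--     res = 0
--     for x in range(x1, x2 + 1):
--         if y1 == 0:
--             res += PSumTable[x * N + y2]
--         else:
--             res += PSumTable[x * N + y2] - PSumTable[x * N + y1 - 1]
--     return res
-- ===== SOURCE B (Python) =====
-- def get_area_sum(N, x1, y1, x2, y2, PSumTable):
--     # Divide and conquer on the row interval: recurse on halves instead of a
--     # linear accumulator loop; a single row is the base case.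
--     if x1 > x2:
--         return 0
--     if x1 == x2:
--         v = PSumTable[x1 * N + y2]
--         return v if y1 == 0 else v - PSumTable[x1 * N + y1 - 1]
--     mid = (x1 + x2) // 2
--     return (get_area_sum(N, x1, y1, mid, y2, PSumTable)
--             + get_area_sum(N, mid + 1, y1, x2, y2, PSumTable))
-- ===== Notes on version B (the rewrite author's own statement) =====
-- stated objective: alternative
-- what changed: Replaces A's single left-to-right branching accumulator loop with a divide-and-conquer recursion that splits the row interval at its midpoint and sums the two halves, with a one-row base case.
import Mathlib
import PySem

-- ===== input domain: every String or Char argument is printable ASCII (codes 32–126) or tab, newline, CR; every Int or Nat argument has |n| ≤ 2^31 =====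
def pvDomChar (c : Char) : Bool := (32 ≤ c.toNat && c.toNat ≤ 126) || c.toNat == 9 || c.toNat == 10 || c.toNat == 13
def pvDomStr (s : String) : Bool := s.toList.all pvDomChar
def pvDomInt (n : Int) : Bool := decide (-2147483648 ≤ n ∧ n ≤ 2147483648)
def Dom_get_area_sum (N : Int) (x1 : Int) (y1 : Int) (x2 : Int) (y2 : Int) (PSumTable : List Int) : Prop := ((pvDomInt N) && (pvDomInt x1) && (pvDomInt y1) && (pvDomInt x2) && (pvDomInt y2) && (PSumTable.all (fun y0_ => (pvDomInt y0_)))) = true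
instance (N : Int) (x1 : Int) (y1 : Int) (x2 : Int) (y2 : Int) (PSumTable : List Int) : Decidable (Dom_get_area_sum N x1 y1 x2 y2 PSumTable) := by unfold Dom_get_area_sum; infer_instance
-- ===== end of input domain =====

-- B replaces A's linear branching accumulator loop by a divide-and-conquer recursion on the
-- row interval (objective: alternative; same cost). Pre_ excludes the inputs on which A raises IndexError.


-- ===== PORT A =====
def get_area_sum (N : Int) (x1 : Int) (y1 : Int) (x2 : Int) (y2 : Int) (PSumTable : List Int) : Int :=
  (PySem.List.pyRange x1 (x2 + 1) 1).foldl
    (fun res x =>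
      if y1 = 0 then
        res + PySem.List.pyGetD PSumTable (x * N + y2) 0
      else
        res + (PySem.List.pyGetD PSumTable (x * N + y2) 0
               - PySem.List.pyGetD PSumTable (x * N + y1 - 1) 0)) 0

-- ===== PORT B =====
-- Source B's divide-and-conquer recursion, made structural with a fuel bound on the recursion
-- depth ((x2-x1).toNat+1 always suffices: each call strictly shrinks the interval); the
-- fuel is only a totality guard, the branch structure is Source B's.
def pvAltGo (fuel : Nat) (N : Int) (x1 : Int) (y1 : Int) (x2 : Int) (y2 : Int) (PSumTable : List Int) : Int :=
  match fuel with
  | 0 => 0  -- unreachable: fuel exceeds the interval length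
  | Nat.succ f =>
    if x1 > x2 then 0
    else if x1 = x2 then
      let v := PySem.List.pyGetD PSumTable (x1 * N + y2) 0
      if y1 = 0 then v else v - PySem.List.pyGetD PSumTable (x1 * N + y1 - 1) 0
    else
      let mid := PySem.Int.floordiv (x1 + x2) 2
      pvAltGo f N x1 y1 mid y2 PSumTable + pvAltGo f N (mid + 1) y1 x2 y2 PSumTable

def get_area_sum_alt (N : Int) (x1 : Int) (y1 : Int) (x2 : Int) (y2 : Int) (PSumTable : List Int) : Int :=
  pvAltGo ((x2 - x1).toNat + 1) N x1 y1 x2 y2 PSumTable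

-- ===== PRECONDITION & SPEC =====
-- Pre_ excludes exactly the inputs on which Python A raises IndexError: some accessed index
-- (x*N+y2 for each row x, and x*N+y1-1 when y1 ≠ 0) is out of range.
-- Since x*N+c is linear (monotone) in x, "in range for every x in [x1,x2]" ⟺ "in range at both
-- endpoints"; this endpoint form is stated so it decides fast on huge ranges.
def Pre_get_area_sum (N : Int) (x1 : Int) (y1 : Int) (x2 : Int) (y2 : Int) (PSumTable : List Int) : Prop :=
  x1 ≤ x2 →
    (PySem.Raise.InRange PSumTable.length (x1 * N + y2) ∧
     PySem.Raise.InRange PSumTable.length (x2 * N + y2) ∧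
     (y1 ≠ 0 → PySem.Raise.InRange PSumTable.length (x1 * N + y1 - 1) ∧
               PySem.Raise.InRange PSumTable.length (x2 * N + y1 - 1)))
instance (N : Int) (x1 : Int) (y1 : Int) (x2 : Int) (y2 : Int) (PSumTable : List Int) : Decidable (Pre_get_area_sum N x1 y1 x2 y2 PSumTable) := by unfold Pre_get_area_sum; infer_instance

def pvWitness_get_area_sum : Int × Int × Int × Int × Int × List Int := (2, 0, 0, 1, 1, [1, 3, 2, 6])

def Spec_get_area_sum (N : Int) (x1 : Int) (y1 : Int) (x2 : Int) (y2 : Int) (PSumTable : List Int) (out : Int) : Prop := out = get_area_sum_alt N x1 y1 x2 y2 PSumTable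
instance (N : Int) (x1 : Int) (y1 : Int) (x2 : Int) (y2 : Int) (PSumTable : List Int) (out : Int) : Decidable (Spec_get_area_sum N x1 y1 x2 y2 PSumTable out) := by unfold Spec_get_area_sum; infer_instance

-- ===== CLAIM (what is proved, stated in full; the proofs are below) =====
def Claim_equal_get_area_sum : Prop := ∀ (N : Int) (x1 : Int) (y1 : Int) (x2 : Int) (y2 : Int) (PSumTable : List Int), Dom_get_area_sum N x1 y1 x2 y2 PSumTable → Pre_get_area_sum N x1 y1 x2 y2 PSumTable → Spec_get_area_sum N x1 y1 x2 y2 PSumTable (get_area_sum N x1 y1 x2 y2 PSumTable)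

-- ===== LEMMAS AND PROOFS =====

-- midpoint bounds of the split
theorem pv_mid_bounds (x1 x2 : Int) (h : x1 < x2) :
    x1 ≤ PySem.Int.floordiv (x1 + x2) 2 ∧ PySem.Int.floordiv (x1 + x2) 2 < x2 := by
  rw [PySem.Int.floordiv_eq_ediv_of_pos (by omega)]
  omega

-- the per-row value both programs add for row x
def pvRow (N : Int) (y1 : Int) (y2 : Int) (T : List Int) (x : Int) : Int :=
  if y1 = 0 then PySem.List.pyGetD T (x * N + y2) 0
  else PySem.List.pyGetD T (x * N + y2) 0 - PySem.List.pyGetD T (x * N + y1 - 1) 0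

-- an accumulating fold of +f is the accumulator plus the sum of the mapped list
theorem pv_foldl_add_eq_sum (f : Int → Int) (L : List Int) (s : Int) :
    L.foldl (fun r x => r + f x) s = s + (L.map f).sum := by
  induction L generalizing s with
  | nil => simp
  | cons a t ih => simp [ih]; ring

-- A's fold is the sum of the row values over the range
theorem pv_A_eq_sum (N x1 y1 x2 y2 : Int) (T : List Int) :
    get_area_sum N x1 y1 x2 y2 T
      = ((PySem.List.pyRange x1 (x2 + 1) 1).map (pvRow N y1 y2 T)).sum := by
  unfold get_area_sum
  have hrow : pvRow N y1 y2 T = fun x =>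
      if y1 = 0 then PySem.List.pyGetD T (x * N + y2) 0
      else PySem.List.pyGetD T (x * N + y2) 0 - PySem.List.pyGetD T (x * N + y1 - 1) 0 := by
    funext x; simp [pvRow]
  rw [hrow]
  by_cases h : y1 = 0
  · simp [h, pv_foldl_add_eq_sum]
  · simp [h, pv_foldl_add_eq_sum]

-- B's fueled divide-and-conquer recursion is the same sum (induction on the fuel)
theorem pv_go_eq_sum (N y1 y2 : Int) (T : List Int) :
    ∀ (fuel : Nat) (x1 x2 : Int), (x2 - x1).toNat < fuel →
      pvAltGo fuel N x1 y1 x2 y2 T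
        = ((PySem.List.pyRange x1 (x2 + 1) 1).map (pvRow N y1 y2 T)).sum := by
  intro fuel
  induction fuel with
  | zero => intro x1 x2 h; omega
  | succ f ih =>
    intro x1 x2 hle
    rcases lt_trichotomy x1 x2 with h | h | h
    · have hm := pv_mid_bounds x1 x2 h
      set mid := PySem.Int.floordiv (x1 + x2) 2 with hmid
      have hsplit := PySem.List.pyRange_one_append x1 (mid + 1) (x2 + 1)
        (by omega) (by omega)
      show pvAltGo (f + 1) N x1 y1 x2 y2 T = _
      rw [pvAltGo, if_neg (show ¬ x1 > x2 by omega), if_neg (show ¬ x1 = x2 by omega)]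
      show pvAltGo f N x1 y1 mid y2 T + pvAltGo f N (mid + 1) y1 x2 y2 T
        = ((PySem.List.pyRange x1 (x2 + 1) 1).map (pvRow N y1 y2 T)).sum
      rw [ih x1 mid (by omega), ih (mid + 1) x2 (by omega), hsplit]
      simp
    · simp [pvAltGo, h, PySem.List.pyRange_one_singleton, pvRow]
    · simp [pvAltGo, h, PySem.List.pyRange_one_eq_nil (by omega : x2 + 1 ≤ x1)]

-- ===== VERDICT (by name: the statement is the Claim_ definition above) =====
theorem get_area_sum_spec : Claim_equal_get_area_sum := by
  intro N x1 y1 x2 y2 T _ _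
  unfold Spec_get_area_sum
  rw [pv_A_eq_sum]
  exact (pv_go_eq_sum N y1 y2 T ((x2 - x1).toNat + 1) x1 x2 (by omega)).symm ▸ rfl
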